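-- pv_equiv track=rewrite | github.com/lordruption/compsci101 | Labs/LAB14/question1v2.py | create_tuples_list
-- ===== SOURCE A (Python) =====
-- def create_tuples_list(number):
--     total = 0
--     list = []
--     number_plus_one = number + 1
--     for i in range(1,number_plus_one):
--         total = total + i
--         list.append((i,total))
--     return list
-- ===== SOURCE B (Python) =====
-- def create_tuples_list(number):
--     return [(i, i * (i + 1) // 2) for i in range(1, number + 1)]
-- ===== Notes on version B (the rewrite author's own statement) =====
-- stated objective: simpler
-- what changed: Replaces the running-total accumulator loop with a single comprehension computing each cumulative sum in closed form as the triangular number i*(i+1)//2.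
import Mathlib
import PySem

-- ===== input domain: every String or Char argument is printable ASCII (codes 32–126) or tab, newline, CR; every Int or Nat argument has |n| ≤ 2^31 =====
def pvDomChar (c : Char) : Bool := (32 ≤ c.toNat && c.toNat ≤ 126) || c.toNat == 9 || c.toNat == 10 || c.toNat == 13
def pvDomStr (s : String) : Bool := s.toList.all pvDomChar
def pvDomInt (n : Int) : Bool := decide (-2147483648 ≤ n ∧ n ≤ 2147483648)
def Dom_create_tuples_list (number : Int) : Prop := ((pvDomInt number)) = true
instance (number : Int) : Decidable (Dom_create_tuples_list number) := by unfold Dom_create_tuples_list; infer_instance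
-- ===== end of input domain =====

-- ===== PORT A =====
-- loop over range(1, number+1) carrying (total, list); transliteration of A
def create_tuples_list (number : Int) : List (Int × Int) :=
  (PySem.List.pyRange 1 (number + 1) 1).foldl
    (fun (st : Int × List (Int × Int)) i => (st.1 + i, st.2 ++ [(i, st.1 + i)]))
    (0, []) |>.2

-- ===== PORT B =====
-- B: closed-form triangular number per element, no accumulator
def create_tuples_list_alt (number : Int) : List (Int × Int) :=
  (PySem.List.pyRange 1 (number + 1) 1).map
    (fun i => (i, PySem.Int.floordiv (i * (i + 1)) 2))

-- ===== PRECONDITION & SPEC =====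
def Spec_create_tuples_list (number : Int) (out : List (Int × Int)) : Prop := out = create_tuples_list_alt number
instance (number : Int) (out : List (Int × Int)) : Decidable (Spec_create_tuples_list number out) := by unfold Spec_create_tuples_list; infer_instance

-- ===== CLAIM (what is proved, stated in full; the proofs are below) =====
def Claim_equal_create_tuples_list : Prop := ∀ (number : Int), Dom_create_tuples_list number → Spec_create_tuples_list number (create_tuples_list number)

-- ===== LEMMAS AND PROOFS =====

-- ===== VERDICT (by name: the statement is the Claim_ definition above) =====
-- key lemma: for 1 ≤ b, fold over range(1,b) from any point equals the map, when the
-- accumulator holds the triangular number of the last processed index.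
theorem tri_next (i : Int) : PySem.Int.floordiv ((i-1) * i) 2 + i = PySem.Int.floordiv (i * (i+1)) 2 := by
  have h2 : (2:Int) ≠ 0 := by norm_num
  rcases Int.even_or_odd i with ⟨k, hk⟩ | ⟨k, hk⟩
  · subst hk
    have e1 : (k + k - 1) * (k + k) = 2 * (k * (k + k - 1)) := by ring
    have e2 : (k + k) * (k + k + 1) = 2 * (k * (k + k + 1)) := by ring
    simp only [PySem.Int.floordiv]
    rw [e1, e2, Int.mul_fdiv_cancel_left _ h2, Int.mul_fdiv_cancel_left _ h2]
    ring
  · subst hk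
    have e1 : (2 * k + 1 - 1) * (2 * k + 1) = 2 * (k * (2 * k + 1)) := by ring
    have e2 : (2 * k + 1) * (2 * k + 1 + 1) = 2 * ((k + 1) * (2 * k + 1)) := by ring
    simp only [PySem.Int.floordiv]
    rw [e1, e2, Int.mul_fdiv_cancel_left _ h2, Int.mul_fdiv_cancel_left _ h2]
    ring

theorem fold_eq (a b : Int) (ha : 1 ≤ a) (acc : List (Int × Int)) :
    ((PySem.List.pyRange a b 1).foldl
      (fun (st : Int × List (Int × Int)) i => (st.1 + i, st.2 ++ [(i, st.1 + i)]))
      (PySem.Int.floordiv ((a-1) * a) 2, acc)).2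
    = acc ++ (PySem.List.pyRange a b 1).map (fun i => (i, PySem.Int.floordiv (i * (i+1)) 2)) := by
  by_cases hab : a < b
  · have hlen : (b - (a+1)).toNat < (b - a).toNat := by omega
    rw [PySem.List.pyRange_one_cons hab]
    simp only [List.foldl_cons, List.map_cons]
    have step := tri_next a
    rw [show PySem.Int.floordiv ((a-1)*a) 2 + a = PySem.Int.floordiv (a*(a+1)) 2 from step]
    have : PySem.Int.floordiv (a*(a+1)) 2 = PySem.Int.floordiv (((a+1)-1)*(a+1)) 2 := by ring_nf
    rw [this]
    rw [fold_eq (a+1) b (by omega) (acc ++ [(a, PySem.Int.floordiv (((a+1)-1)*(a+1)) 2)])]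
    simp [List.append_assoc]
  · rw [PySem.List.pyRange_one_eq_nil (by omega)]
    simp
termination_by (b - a).toNat
decreasing_by omega

theorem create_tuples_list_spec : Claim_equal_create_tuples_list := by
  intro number _
  unfold Spec_create_tuples_list create_tuples_list create_tuples_list_alt
  have h := fold_eq 1 (number + 1) (by norm_num) []
  simpa using h
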